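-- pv_equiv track=rewrite | github.com/marlep-pi314/AdventOfCode2020 | 12-10/aoc10.py | get_jolt_jumps
-- ===== SOURCE A (Python) =====
-- def get_jolt_jumps(adapter_list):
--     jump_list = [adapter_list[i]-adapter_list[i-1] for i in range(1,len(adapter_list))]
--     occ_of_ones = 0
--     occ_dic = {}
--     for i in range(0,len(jump_list)):
--         if jump_list[i] == 3:
--             if occ_of_ones not in occ_dic:
--                 occ_dic[occ_of_ones] = 0
--             occ_dic[occ_of_ones] += 1
--             occ_of_ones = 0
--         elif jump_list[i] == 1:
--             occ_of_ones += 1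
--     return occ_dic, jump_list
-- ===== SOURCE B (Python) =====
-- def get_jolt_jumps(adapter_list):
--     jump_list = [b - a for a, b in zip(adapter_list, adapter_list[1:])]
--     # prefix counts: pref[i] = number of 1s among jump_list[:i]
--     pref = [0]
--     total = 0
--     for j in jump_list:
--         if j == 1:
--             total += 1
--         pref.append(total)
--     # positions of the 3s; each run length is a difference of two prefix samples
--     threes = [i for i, j in enumerate(jump_list) if j == 3]
--     runs = [pref[p] - pref[q] for q, p in zip([0] + threes, threes)]
--     keys = list(dict.fromkeys(runs))
--     occ_dic = {k: runs.count(k) for k in keys}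
--     return occ_dic, jump_list
-- ===== Notes on version B (the rewrite author's own statement) =====
-- stated objective: alternative
-- what changed: Replaces A's single interleaved stateful scan (run counter reset at each 3 with incremental dict updates) by an index-based pipeline: build the difference list by zipping, build a prefix-count array of 1s, extract the positions of the 3s, obtain each run length as a difference of two prefix samples at consecutive 3-positions, then build the dict from the deduplicated run lengths with list.count.
import Mathlib
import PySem

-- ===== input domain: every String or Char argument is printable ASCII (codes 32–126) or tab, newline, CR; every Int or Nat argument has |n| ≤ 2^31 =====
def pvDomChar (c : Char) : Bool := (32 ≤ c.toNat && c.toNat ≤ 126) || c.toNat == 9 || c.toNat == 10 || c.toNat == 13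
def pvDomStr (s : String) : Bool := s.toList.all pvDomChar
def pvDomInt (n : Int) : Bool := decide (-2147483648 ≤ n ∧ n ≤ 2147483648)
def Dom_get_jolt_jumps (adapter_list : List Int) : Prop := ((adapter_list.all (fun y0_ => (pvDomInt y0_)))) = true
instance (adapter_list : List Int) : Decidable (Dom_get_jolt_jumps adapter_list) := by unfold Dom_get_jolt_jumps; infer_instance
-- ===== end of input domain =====

-- B replaces A's interleaved stateful scan by an index pipeline (prefix counts of 1s, positions of 3s,
-- run lengths as prefix differences, dict from deduplicated run lengths); return values proved equal
-- (objective: alternative, same asymptotic cost).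

-- ===== PORT A =====
-- loop body of A's 'for i in range(0, len(jump_list))', on the current element j = jump_list[i]
def stepA (s : Int × PySem.Dict Int Int) (j : Int) : Int × PySem.Dict Int Int :=
  if j = 3 then
    -- 'if occ_of_ones not in occ_dic: occ_dic[occ_of_ones] = 0' then 'occ_dic[occ_of_ones] += 1'
    let d1 := if s.2.contains s.1 then s.2 else s.2.insert s.1 0
    (0, d1.insert s.1 (d1.getD s.1 0 + 1))
  else if j = 1 then (s.1 + 1, s.2) else s

def get_jolt_jumps (adapter_list : List Int) : (List (Int × Int)) × List Int :=
  let jump_list := (PySem.List.pyRange 1 (adapter_list.length : Int) 1).map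
      (fun i => PySem.List.pyGetD adapter_list i 0 - PySem.List.pyGetD adapter_list (i - 1) 0)
  let s := (PySem.List.pyRange 0 (jump_list.length : Int) 1).foldl
      (fun s i => stepA s (PySem.List.pyGetD jump_list i 0)) (0, PySem.Dict.empty)
  (s.2.items, jump_list)

-- ===== PORT B =====
-- loop body of B's prefix pass: 'if j == 1: total += 1' then 'pref.append(total)' (state: pref, total)
def prefStep (s : List Int × Int) (j : Int) : List Int × Int :=
  let t := if j = 1 then s.2 + 1 else s.2
  (s.1 ++ [t], t)

def get_jolt_jumps_alt (adapter_list : List Int) : (List (Int × Int)) × List Int :=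
  -- zip(adapter_list, adapter_list[1:]): the slice [1:] is List.drop 1 (exact: PySem.List.slice_from)
  let jump_list := (adapter_list.zip (adapter_list.drop 1)).map (fun p => p.2 - p.1)
  let pref := (jump_list.foldl prefStep ([0], 0)).1
  -- '[i for i, j in enumerate(jump_list) if j == 3]'
  let threes := ((PySem.List.enumerate jump_list).filter (fun p => p.2 == 3)).map (·.1)
  -- '[pref[p] - pref[q] for q, p in zip([0] + threes, threes)]'
  let runs := (((0 : Int) :: threes).zip threes).map
      (fun qp => PySem.List.pyGetD pref qp.2 0 - PySem.List.pyGetD pref qp.1 0)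
  -- 'list(dict.fromkeys(runs))'
  let keys := PySem.List.dedup runs
  -- '{k: runs.count(k) for k in keys}'
  let occ_dic := keys.foldl (fun (d : PySem.Dict Int Int) k => d.insert k ((runs.count k : Int))) PySem.Dict.empty
  (occ_dic.items, jump_list)

-- ===== PRECONDITION & SPEC =====
def Spec_get_jolt_jumps (adapter_list : List Int) (out : (List (Int × Int)) × List Int) : Prop := out = get_jolt_jumps_alt adapter_list
instance (adapter_list : List Int) (out : (List (Int × Int)) × List Int) : Decidable (Spec_get_jolt_jumps adapter_list out) := by unfold Spec_get_jolt_jumps; infer_instance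

-- ===== CLAIM (what is proved, stated in full; the proofs are below) =====
def Claim_equal_get_jolt_jumps : Prop := ∀ (adapter_list : List Int), Dom_get_jolt_jumps adapter_list → Spec_get_jolt_jumps adapter_list (get_jolt_jumps adapter_list)

-- ===== LEMMAS AND PROOFS =====

-- the two difference lists coincide
theorem jumps_eq (xs : List Int) :
    (PySem.List.pyRange 1 (xs.length : Int) 1).map
      (fun i => PySem.List.pyGetD xs i 0 - PySem.List.pyGetD xs (i - 1) 0)
    = (xs.zip (xs.drop 1)).map (fun p => p.2 - p.1) := by
  apply List.ext_getElem
  · simp [PySem.List.length_pyRange_one]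
  · intro k h1 h2
    simp only [List.getElem_map, PySem.List.getElem_pyRange_one, List.getElem_zip,
      List.getElem_drop]
    have hk : k + 1 < xs.length := by
      simp at h2; omega
    have e1 : (1 : Int) + k - 1 = (k : Int) := by ring
    have e2 : (1 : Int) + k = ((k + 1 : Nat) : Int) := by push_cast; ring
    rw [e1, e2, PySem.List.pyGetD_natCast, PySem.List.pyGetD_natCast,
      List.getD_eq_getElem xs 0 hk, List.getD_eq_getElem xs 0 (by omega)]
    simp [Nat.add_comm]

-- common reference point: the list of 1-run lengths closed off by each 3
def runsSpec : List Int → Int → List Int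
  | [], _ => []
  | j :: t, c => if j = 3 then c :: runsSpec t 0 else runsSpec t (if j = 1 then c + 1 else c)

-- add c to the first run (starting the scan with c ones already seen)
def addHead (c : Int) : List Int → List Int
  | [] => []
  | h :: tl => (c + h) :: tl

theorem addHead_add (a b : Int) (x : List Int) :
    addHead a (addHead b x) = addHead (a + b) x := by
  cases x <;> simp [addHead] <;> ring

theorem addHead_zero (x : List Int) : addHead 0 x = x := by
  cases x <;> simp [addHead]

theorem runsSpec_shift (js : List Int) (c : Int) :
    runsSpec js c = addHead c (runsSpec js 0) := by
  induction js generalizing c with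
  | nil => simp [runsSpec, addHead]
  | cons j t ih =>
    by_cases h3 : j = 3
    · simp [runsSpec, h3, addHead]
    · simp only [runsSpec, if_neg h3]
      rw [ih (if j = 1 then c + 1 else c), ih (if j = 1 then 0 + 1 else 0), addHead_add]
      by_cases h1 : j = 1 <;> simp [h1]

-- ---------- A side ----------

-- A's conditional dict update is the counter step
def cntStep (d : PySem.Dict Int Int) (x : Int) : PySem.Dict Int Int :=
  d.insert x (d.getD x 0 + 1)

theorem bump_eq (d : PySem.Dict Int Int) (k : Int) :
    ((if d.contains k then d else d.insert k 0).insert k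
      ((if d.contains k then d else d.insert k 0).getD k 0 + 1)) = cntStep d k := by
  by_cases h : d.contains k
  · simp [h, cntStep]
  · have hf : d.contains k = false := by simpa using h
    rw [if_neg h, PySem.Dict.getD_insert_self, PySem.Dict.insert_insert_self]
    simp only [cntStep]
    rw [PySem.Dict.getD_of_not_contains]
    exact hf

-- run-collecting step (proof device for A's loop)
def runStep (s : List Int × Int) (j : Int) : List Int × Int :=
  if j = 3 then (s.1 ++ [s.2], 0) else if j = 1 then (s.1, s.2 + 1) else s

theorem runs_shift (js : List Int) (rs : List Int) (occ : Int) :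
    js.foldl runStep (rs, occ)
      = (rs ++ (js.foldl runStep ([], occ)).1, (js.foldl runStep ([], occ)).2) := by
  induction js generalizing rs occ with
  | nil => simp
  | cons j t ih =>
    simp only [List.foldl_cons, runStep]
    split_ifs with h1 h2
    · rw [ih (rs ++ [occ]) 0, ih ([] ++ [occ]) 0]
      simp
    · exact ih rs (occ + 1)
    · exact ih rs occ

theorem stepA_three (s : Int × PySem.Dict Int Int) : stepA s 3 = (0, cntStep s.2 s.1) := by
  simp [stepA, bump_eq]

theorem stepA_one (s : Int × PySem.Dict Int Int) : stepA s 1 = (s.1 + 1, s.2) := by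
  simp [stepA]

theorem stepA_other (s : Int × PySem.Dict Int Int) (j : Int) (h1 : j ≠ 3) (h2 : j ≠ 1) :
    stepA s j = s := by
  simp [stepA, h1, h2]

theorem runStep_three (s : List Int × Int) : runStep s 3 = (s.1 ++ [s.2], 0) := by
  simp [runStep]

theorem runStep_one (s : List Int × Int) : runStep s 1 = (s.1, s.2 + 1) := by
  simp [runStep]

theorem runStep_other (s : List Int × Int) (j : Int) (h1 : j ≠ 3) (h2 : j ≠ 1) :
    runStep s j = s := by
  simp [runStep, h1, h2]

-- interleaved counting = collect the runs, then count them
theorem main_loop (js : List Int) (occ : Int) (d : PySem.Dict Int Int) :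
    js.foldl stepA (occ, d)
      = ((js.foldl runStep ([], occ)).2,
         (js.foldl runStep ([], occ)).1.foldl cntStep d) := by
  induction js generalizing occ d with
  | nil => simp
  | cons j t ih =>
    by_cases h1 : j = 3
    · subst h1
      rw [List.foldl_cons, List.foldl_cons, stepA_three, runStep_three,
        ih 0 (cntStep d occ), runs_shift t ([] ++ [occ]) 0]
      simp
    · by_cases h2 : j = 1
      · subst h2
        rw [List.foldl_cons, List.foldl_cons, stepA_one, runStep_one]
        exact ih (occ + 1) d
      · rw [List.foldl_cons, List.foldl_cons, stepA_other _ _ h1 h2,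
          runStep_other _ _ h1 h2]
        exact ih occ d

-- the collected runs are runsSpec
theorem runStep_fold_fst (js : List Int) (c : Int) :
    (js.foldl runStep ([], c)).1 = runsSpec js c := by
  induction js generalizing c with
  | nil => simp [runsSpec]
  | cons j t ih =>
    by_cases h1 : j = 3
    · subst h1
      rw [List.foldl_cons, runStep_three, runs_shift t ([] ++ [c]) 0]
      simp [runsSpec, ih]
    · by_cases h2 : j = 1
      · subst h2
        rw [List.foldl_cons, runStep_one]
        simpa [runsSpec] using ih (c + 1)
      · rw [List.foldl_cons, runStep_other _ _ h1 h2]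
        simpa [runsSpec, h1, h2] using ih c

-- ---------- B side ----------

-- number of 1s among the first i differences, as an Int
def cnt (js : List Int) (i : Nat) : Int := ((js.take i).count 1 : Int)

theorem cnt_zero (js : List Int) : cnt js 0 = 0 := by simp [cnt]

theorem cnt_succ (j : Int) (t : List Int) (k : Nat) :
    cnt (j :: t) (k + 1) = (if j = 1 then 1 else 0) + cnt t k := by
  simp only [cnt, List.take_succ_cons, List.count_cons]
  by_cases h : j = 1 <;> simp [h] <;> ring

-- list form of the prefix pass: the values appended after the seed
def prefL : List Int → Int → List Int
  | [], _ => []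
  | j :: t, c =>
      let c' := if j = 1 then c + 1 else c
      c' :: prefL t c'

theorem prefStep_fold (js : List Int) (acc : List Int) (c : Int) :
    js.foldl prefStep (acc, c) = (acc ++ prefL js c, c + (js.count 1 : Int)) := by
  induction js generalizing acc c with
  | nil => simp [prefL]
  | cons j t ih =>
    simp only [List.foldl_cons, prefStep, prefL]
    rw [ih]
    by_cases h : j = 1 <;> simp [h] <;> ring

theorem prefL_getD (js : List Int) (c : Int) (k : Nat) (hk : k ≤ js.length) :
    (c :: prefL js c).getD k 0 = c + cnt js k := by
  induction js generalizing c k with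
  | nil =>
    have hk0 : k = 0 := by simpa using hk
    subst hk0
    simp [cnt]
  | cons j t ih =>
    cases k with
    | zero => simp [cnt_zero]
    | succ k =>
      simp only [prefL, List.getD_cons_succ]
      rw [ih _ k (by simpa using hk), cnt_succ]
      by_cases h : j = 1 <;> simp [h] <;> ring

-- positions of the 3s, as Nat indices
def threesN : List Int → List Nat
  | [] => []
  | j :: t => if j = 3 then 0 :: (threesN t).map (· + 1) else (threesN t).map (· + 1)

theorem mem_threesN_lt (js : List Int) (k : Nat) (hk : k ∈ threesN js) : k < js.length := by
  induction js generalizing k with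
  | nil => simp [threesN] at hk
  | cons j t ih =>
    have hmap : ∀ m, m ∈ (threesN t).map (· + 1) → m < (j :: t).length := by
      intro m hm
      obtain ⟨m', hm', rfl⟩ := List.mem_map.mp hm
      have := ih m' hm'
      simp only [List.length_cons]
      omega
    simp only [threesN] at hk
    by_cases h : j = 3
    · rw [if_pos h] at hk
      rcases List.mem_cons.mp hk with h0 | h0
      · simp [h0]
      · exact hmap k h0
    · rw [if_neg h] at hk
      exact hmap k hk

-- the enumerate/filter/map pipeline computes threesN (shifted by the start)
theorem threesE_eq (js : List Int) (s : Int) :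
    ((PySem.List.enumerate js s).filter (fun p => p.2 == 3)).map (·.1)
      = (threesN js).map (fun k : Nat => s + (k : Int)) := by
  induction js generalizing s with
  | nil => simp [PySem.List.enumerate_nil, threesN]
  | cons j t ih =>
    have tail_eq : ((threesN t).map (· + 1)).map (fun k : Nat => s + (k : Int))
        = (threesN t).map (fun k : Nat => s + 1 + (k : Int)) := by
      rw [List.map_map]
      apply List.map_congr_left
      intro k _
      simp only [Function.comp]
      push_cast
      ring
    rw [PySem.List.enumerate_cons]
    by_cases h : j = 3
    · simp only [threesN, if_pos h, List.filter_cons]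
      rw [if_pos (by simp [h])]
      rw [List.map_cons, ih (s + 1), List.map_cons, tail_eq]
      norm_num
    · simp only [threesN, if_neg h, List.filter_cons]
      rw [if_neg (by simp [h])]
      rw [ih (s + 1), tail_eq]

-- prefix differences sampled at consecutive 3-positions are the run lengths
theorem runsN_core (j : Int) (t : List Int) (F G : Nat → Int)
    (hF0 : F 0 = 0) (hG0 : G 0 = 0)
    (hFG : ∀ k, F (k + 1) = (if j = 1 then 1 else 0) + G k) (T : List Nat) :
    (((0 :: T.map (· + 1)).zip (T.map (· + 1))).map (fun qp => F qp.2 - F qp.1))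
      = addHead (if j = 1 then 1 else 0) (((0 :: T).zip T).map (fun qp => G qp.2 - G qp.1)) := by
  cases T with
  | nil => simp [addHead]
  | cons h tl =>
    have hz : ((h + 1) :: tl.map (· + 1)) = (h :: tl).map (· + 1) := by simp
    simp only [List.map_cons, List.zip_cons_cons, List.map_cons, addHead]
    congr 1
    · rw [hFG h, hF0, hG0]
      ring
    · rw [hz, List.zip_map, List.map_map]
      apply List.map_congr_left
      intro qp _
      simp only [Function.comp, Prod.map]
      rw [hFG qp.2, hFG qp.1]
      ring

theorem runsN_eq (js : List Int) :
    (((0 :: threesN js).zip (threesN js)).map (fun qp => cnt js qp.2 - cnt js qp.1))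
      = runsSpec js 0 := by
  induction js with
  | nil => simp [threesN, runsSpec]
  | cons j t ih =>
    have core := runsN_core j t (cnt (j :: t)) (cnt t) (cnt_zero _) (cnt_zero _)
      (fun k => cnt_succ j t k) (threesN t)
    by_cases h3 : j = 3
    · simp only [threesN, if_pos h3, List.zip_cons_cons, List.map_cons]
      rw [core, ih]
      have h30 : (if j = 1 then (1 : Int) else 0) = 0 := by simp [h3]
      rw [h30, addHead_zero]
      simp [runsSpec, h3, cnt_zero]
    · simp only [threesN, if_neg h3]
      rw [core, ih]
      simp only [runsSpec, if_neg h3]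
      rw [runsSpec_shift t (if j = 1 then 0 + 1 else 0)]
      by_cases h1 : j = 1 <;> simp [h1]

-- ===== VERDICT (by name: the statement is the Claim_ definition above) =====
theorem get_jolt_jumps_spec : Claim_equal_get_jolt_jumps := by
  intro xs _
  unfold Spec_get_jolt_jumps get_jolt_jumps get_jolt_jumps_alt
  simp only [jumps_eq]
  set js := (xs.zip (xs.drop 1)).map (fun p => p.2 - p.1) with hjs
  rw [PySem.List.foldl_pyRange_zero_pyGetD' (f := stepA)]
  rw [main_loop, runStep_fold_fst]
  rw [prefStep_fold, threesE_eq]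
  simp only [zero_add]
  have hget : ∀ k : Nat, k ≤ js.length →
      PySem.List.pyGetD ([0] ++ prefL js 0) ((k : Int)) 0 = cnt js k := by
    intro k hk
    rw [PySem.List.pyGetD_natCast]
    simpa using prefL_getD js 0 k hk
  have h0 : ((0 : Int) :: (threesN js).map (fun k : Nat => (k : Int)))
      = (0 :: threesN js).map (fun k : Nat => (k : Int)) := by
    simp only [List.map_cons, Nat.cast_zero]
  have hB : ((((0 : Int) :: (threesN js).map (fun k : Nat => (k : Int))).zip
        ((threesN js).map (fun k : Nat => (k : Int)))).map
        (fun qp => PySem.List.pyGetD ([0] ++ prefL js 0) qp.2 0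
                 - PySem.List.pyGetD ([0] ++ prefL js 0) qp.1 0))
      = (((0 :: threesN js).zip (threesN js)).map (fun qp => cnt js qp.2 - cnt js qp.1)) := by
    rw [h0, List.zip_map, List.map_map]
    apply List.map_congr_left
    intro qp hqp
    have hmem := List.of_mem_zip hqp
    have hb2 : qp.2 ≤ js.length := le_of_lt (mem_threesN_lt js qp.2 hmem.2)
    have hb1 : qp.1 ≤ js.length := by
      rcases List.mem_cons.mp hmem.1 with h | h
      · simp [h]
      · exact le_of_lt (mem_threesN_lt js qp.1 h)
    simp only [Function.comp, Prod.map]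
    rw [hget qp.2 hb2, hget qp.1 hb1]
  rw [hB, runsN_eq]
  congr 1
  have hA : (runsSpec js 0).foldl cntStep PySem.Dict.empty = PySem.Dict.counter (runsSpec js 0) := by
    simpa [cntStep] using PySem.Dict.foldl_insert_getD_add_one_eq_counter (xs := runsSpec js 0)
  rw [hA, PySem.Dict.items_counter]
  have hfresh := PySem.Dict.items_foldl_insert_fresh
    (l := PySem.List.dedup (runsSpec js 0)) (k := fun a => a)
    (v := fun a => ((runsSpec js 0).count a : Int)) (d := PySem.Dict.empty)
    (by intro a _; simp) (by simpa using PySem.List.nodup_dedup (runsSpec js 0))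
  rw [hfresh]
  simp [PySem.List.dedup_eq_ofList, PySem.Dict.empty]
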